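-- pv_equiv track=rewrite | github.com/NagarajuSaripally/PythonCourse | Methods/functionTest01.py | old_macdonald
-- ===== SOURCE A (Python) =====
-- def old_macdonald(name):
-- 	newName = ''
-- 	for index, x in enumerate(name):
-- 		if index == 0 or index == 3:
-- 			newName += x.upper()
-- 		else:
-- 			newName += x.lower()
-- 	return newName;
-- ===== SOURCE B (Python) =====
-- def old_macdonald(name):
--     return (name[0:1].upper() + name[1:3].lower()
--             + name[3:4].upper() + name[4:].lower())
-- ===== Notes on version B (the rewrite author's own statement) =====
-- stated objective: faster
-- what changed: Replaced the per-character enumerate loop with index branching by a single concatenation of four fixed half-open slices, uppercased/lowercased segment-wise.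
import Mathlib
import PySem

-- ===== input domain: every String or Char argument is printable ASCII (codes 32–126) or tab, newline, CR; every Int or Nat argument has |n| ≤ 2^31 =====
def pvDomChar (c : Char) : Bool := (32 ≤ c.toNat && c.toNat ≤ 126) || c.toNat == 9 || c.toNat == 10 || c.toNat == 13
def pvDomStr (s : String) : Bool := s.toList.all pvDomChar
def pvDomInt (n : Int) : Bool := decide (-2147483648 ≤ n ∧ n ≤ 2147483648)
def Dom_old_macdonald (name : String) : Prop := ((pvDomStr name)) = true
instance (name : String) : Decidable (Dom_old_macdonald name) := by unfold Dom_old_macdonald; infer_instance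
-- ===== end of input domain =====

-- B replaces the per-character enumerate loop by a concatenation of four fixed slices; objective: simpler.


-- ===== PORT A =====
-- the loop body: newName += x.upper() if index in {0,3} else x.lower()
def omStep (acc : List Char) (p : Int × Char) : List Char :=
  if p.1 == 0 || p.1 == 3 then acc ++ [PySem.Chars.upperChar p.2]
  else acc ++ [PySem.Chars.lowerChar p.2]

def old_macdonald (name : String) : String :=
  String.ofList ((PySem.List.enumerate name.toList 0).foldl omStep [])

-- ===== PORT B =====
def old_macdonald_alt (name : String) : String :=
  PySem.Str.upper (PySem.Str.slice name (some 0) (some 1))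
    ++ PySem.Str.lower (PySem.Str.slice name (some 1) (some 3))
    ++ PySem.Str.upper (PySem.Str.slice name (some 3) (some 4))
    ++ PySem.Str.lower (PySem.Str.slice name (some 4) none)

-- ===== PRECONDITION & SPEC =====
def Spec_old_macdonald (name : String) (out : String) : Prop := out = old_macdonald_alt name
instance (name : String) (out : String) : Decidable (Spec_old_macdonald name out) := by unfold Spec_old_macdonald; infer_instance

-- ===== CLAIM (what is proved, stated in full; the proofs are below) =====
def Claim_equal_old_macdonald : Prop := ∀ (name : String), Dom_old_macdonald name → Spec_old_macdonald name (old_macdonald name)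

-- ===== LEMMAS AND PROOFS =====

-- once past index 3 the loop only lowercases: the fold is a map of lowerChar
theorem omStep_tail (xs : List Char) (s : Int) (acc : List Char) (hs : 4 ≤ s) :
    (PySem.List.enumerate xs s).foldl omStep acc = acc ++ xs.map PySem.Chars.lowerChar := by
  induction xs generalizing s acc with
  | nil => simp [PySem.List.enumerate_nil]
  | cons c t ih =>
    rw [PySem.List.enumerate_cons, List.foldl_cons, ih (s + 1) _ (by omega)]
    have h0 : (s == (0:Int)) = false := by simp; omega
    have h3 : (s == (3:Int)) = false := by simp; omega
    simp [omStep, h0, h3]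

-- list-level statement: the fold over enumerate equals the four mapped slices
set_option maxHeartbeats 1000000 in
theorem lists_eq (l : List Char) :
    (PySem.List.enumerate l 0).foldl omStep [] =
      PySem.Chars.upper (PySem.List.slice l (some 0) (some 1))
      ++ PySem.Chars.lower (PySem.List.slice l (some 1) (some 3))
      ++ PySem.Chars.upper (PySem.List.slice l (some 3) (some 4))
      ++ PySem.Chars.lower (PySem.List.slice l (some 4) none) := by
  rcases l with _ | ⟨a, _ | ⟨b, _ | ⟨c, _ | ⟨d, t⟩⟩⟩⟩
  · simp [PySem.List.enumerate_nil, pysem, PySem.Chars.upper, PySem.Chars.lower]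
  · rw [PySem.List.enumerate_cons, PySem.List.enumerate_nil]
    norm_num [omStep]
    norm_num [pysem, PySem.Chars.upper, PySem.Chars.lower]
  · rw [PySem.List.enumerate_cons, PySem.List.enumerate_cons, PySem.List.enumerate_nil]
    norm_num [omStep]
    norm_num [pysem, PySem.Chars.upper, PySem.Chars.lower]
    simp
  · rw [PySem.List.enumerate_cons, PySem.List.enumerate_cons, PySem.List.enumerate_cons,
      PySem.List.enumerate_nil]
    norm_num [omStep]
    norm_num [pysem, PySem.Chars.upper, PySem.Chars.lower]
    simp
  · rw [PySem.List.enumerate_cons, PySem.List.enumerate_cons, PySem.List.enumerate_cons,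
      PySem.List.enumerate_cons]
    norm_num [omStep]
    rw [omStep_tail t 4 _ (by omega)]
    norm_num [pysem, PySem.Chars.upper, PySem.Chars.lower]
    simp

theorem old_macdonald_spec' (name : String) :
    old_macdonald name = old_macdonald_alt name := by
  apply String.toList_inj.mp
  unfold old_macdonald old_macdonald_alt
  simp only [String.toList_ofList, String.toList_append, PySem.Str.toList_upper,
    PySem.Str.toList_lower, PySem.Str.toList_slice]
  exact lists_eq name.toList

-- ===== VERDICT (by name: the statement is the Claim_ definition above) =====
theorem old_macdonald_spec : Claim_equal_old_macdonald := by
  intro name _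
  exact old_macdonald_spec' name
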